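-- pv_equiv track=rewrite | github.com/cldborges/telegram-forwarder_auto | funcoes.py | contar_resultados
-- ===== SOURCE A (Python) =====
-- def contar_resultados(resultados, categoria):
--     contador_sequencias = {}
--     sequencia_atual = 0
--     for resultado in resultados:
--         if resultado not in categoria:
--             sequencia_atual += 1
--         else:
--             if sequencia_atual > 0:
--                 contador_sequencias[sequencia_atual] = contador_sequencias.get(sequencia_atual, 0) + 1
--                 sequencia_atual = 0
--     return contador_sequencias
-- ===== SOURCE B (Python) =====
-- def contar_resultados(resultados, categoria):
--     # two-phase: collect separator indices, then count gaps between consecutive separators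
--     separadores = [i for i, resultado in enumerate(resultados) if resultado in categoria]
--     contador_sequencias = {}
--     prev = -1
--     for i in separadores:
--         run = i - prev - 1
--         if run > 0:
--             contador_sequencias[run] = contador_sequencias.get(run, 0) + 1
--         prev = i
--     return contador_sequencias
-- ===== Notes on version B (the rewrite author's own statement) =====
-- stated objective: alternative
-- what changed: B first builds the list of separator indices (positions whose element is in categoria) and then counts the gaps between consecutive separators, instead of A's single scan carrying a running counter that is flushed at each separator; the trailing run is naturally never counted because it ends at no separator.
import Mathlib
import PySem

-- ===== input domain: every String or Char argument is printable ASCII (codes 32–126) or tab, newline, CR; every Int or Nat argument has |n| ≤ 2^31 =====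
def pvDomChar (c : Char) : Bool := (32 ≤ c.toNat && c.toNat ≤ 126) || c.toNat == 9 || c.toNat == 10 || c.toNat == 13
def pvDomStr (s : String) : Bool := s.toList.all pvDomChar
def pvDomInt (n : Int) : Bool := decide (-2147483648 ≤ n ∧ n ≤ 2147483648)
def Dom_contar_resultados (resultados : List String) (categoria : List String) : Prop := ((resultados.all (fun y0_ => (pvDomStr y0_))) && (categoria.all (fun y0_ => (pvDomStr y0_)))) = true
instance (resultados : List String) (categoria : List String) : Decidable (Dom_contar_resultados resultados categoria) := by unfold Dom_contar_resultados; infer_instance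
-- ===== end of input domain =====

-- B replaces A's running-counter scan by collecting separator indices and counting gaps between consecutive separators (alternative decomposition, same cost).
-- ===== PORT A =====
-- loop body of A: if resultado not in categoria: seq += 1 else: flush seq into the dict
def pvStepA (categoria : List String) (st : PySem.Dict Int Int × Int) (resultado : String) : PySem.Dict Int Int × Int :=
  if resultado ∉ categoria then (st.1, st.2 + 1)
  else if st.2 > 0 then (st.1.insert st.2 (st.1.getD st.2 0 + 1), 0) else st

def contar_resultados (resultados : List String) (categoria : List String) : List (Int × Int) :=
  (resultados.foldl (pvStepA categoria) (PySem.Dict.empty, 0)).1.items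

-- ===== PORT B =====
-- loop body of B: run = i - prev - 1; count it if positive; prev = i
def pvStepB (st : PySem.Dict Int Int × Int) (i : Int) : PySem.Dict Int Int × Int :=
  let run := i - st.2 - 1
  ((if run > 0 then st.1.insert run (st.1.getD run 0 + 1) else st.1), i)

def contar_resultados_alt (resultados : List String) (categoria : List String) : List (Int × Int) :=
  let separadores := ((PySem.List.enumerate resultados).filter (fun p => decide (p.2 ∈ categoria))).map (·.1)
  (separadores.foldl pvStepB (PySem.Dict.empty, -1)).1.items

-- ===== PRECONDITION & SPEC =====
def Spec_contar_resultados (resultados : List String) (categoria : List String) (out : List (Int × Int)) : Prop := out = contar_resultados_alt resultados categoria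
instance (resultados : List String) (categoria : List String) (out : List (Int × Int)) : Decidable (Spec_contar_resultados resultados categoria out) := by unfold Spec_contar_resultados; infer_instance

-- ===== CLAIM (what is proved, stated in full; the proofs are below) =====
def Claim_equal_contar_resultados : Prop := ∀ (resultados : List String) (categoria : List String), Dom_contar_resultados resultados categoria → Spec_contar_resultados resultados categoria (contar_resultados resultados categoria)

-- ===== LEMMAS AND PROOFS =====
-- Invariant: after scanning a prefix, A's running counter s and B's last-separator index prev
-- satisfy prev = n - s - 1 where n is the index of the next element; the resulting dicts agree.
theorem pv_key (categoria : List String) (l : List String) :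
    ∀ (n : Int) (d : PySem.Dict Int Int) (s : Int), 0 ≤ s →
    (l.foldl (pvStepA categoria) (d, s)).1 =
      ((((PySem.List.enumerate l n).filter (fun p => decide (p.2 ∈ categoria))).map (·.1)).foldl
        pvStepB (d, n - s - 1)).1 := by
  induction l with
  | nil => intro n d s _; simp [PySem.List.enumerate_nil]
  | cons x xs ih =>
    intro n d s hs
    rw [PySem.List.enumerate_cons]
    by_cases hx : x ∈ categoria
    · have hrun : n - (n - s - 1) - 1 = s := by ring
      have ha : pvStepA categoria (d, s) x =
          (if s > 0 then (d.insert s (d.getD s 0 + 1), 0) else (d, s)) := by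
        simp [pvStepA, hx]
      have hb : pvStepB (d, n - s - 1) n =
          (if s > 0 then (d.insert s (d.getD s 0 + 1), n) else (d, n)) := by
        simp only [pvStepB]
        rw [hrun]
        split_ifs <;> rfl
      simp only [List.foldl_cons, List.filter_cons, hx, decide_true, if_true, List.map_cons, ha, hb]
      have harith : (n : Int) + 1 - 0 - 1 = n := by ring
      by_cases hpos : s > 0
      · rw [if_pos hpos, if_pos hpos]
        have := ih (n + 1) (d.insert s (d.getD s 0 + 1)) 0 le_rfl
        rw [harith] at this
        exact this
      · rw [if_neg hpos, if_neg hpos]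
        have hs0 : s = 0 := by omega
        subst hs0
        have := ih (n + 1) d 0 le_rfl
        rw [harith] at this
        exact this
    · simp only [List.foldl_cons, List.filter_cons, hx, decide_false, pvStepA]
      rw [show n - s - 1 = n + 1 - (s + 1) - 1 by ring]
      exact ih (n + 1) d (s + 1) (by omega)

-- ===== VERDICT (by name: the statement is the Claim_ definition above) =====
theorem contar_resultados_spec : Claim_equal_contar_resultados := by
  intro resultados categoria _
  unfold Spec_contar_resultados contar_resultados contar_resultados_alt
  have := pv_key categoria resultados 0 PySem.Dict.empty 0 le_rfl
  rw [this]
  norm_num
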